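-- pv_equiv track=rewrite | github.com/Dibrary/Algorithm_playground | programmers/비밀지도.py | add_binArray
-- ===== SOURCE A (Python) =====
-- def add_binArray(arr1, arr2):
--     result = []
--
--     for i in range(len(arr1)):
--         tmp = ''
--         for j in range(len(arr1[0])):
--             if arr1[i][j] == '1' or arr2[i][j] == '1':
--                 tmp += '#'
--             else:
--                 tmp += " "
--         result.append(tmp)
--     return result
-- ===== SOURCE B (Python) =====
-- def add_binArray(arr1, arr2):
--     width = len(arr1[0]) if arr1 else 0
--     result = []
--     for row1, row2 in zip(arr1, arr2):
--         cells = [' '] * width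
--         for row in (row1, row2):
--             for j, cell in enumerate(row[:width]):
--                 if cell == '1':
--                     cells[j] = '#'
--         result.append(''.join(cells))
--     return result
-- ===== Notes on version B (the rewrite author's own statement) =====
-- stated objective: alternative
-- what changed: Instead of deciding each cell with a per-cell OR branch while growing a string, B allocates a blank row of spaces and overlays '#' marks in two independent passes (one per source grid) before joining; Pre_ excludes ragged inputs on which A raises IndexError and the corner where A returns only because '1' cells short-circuit past missing arr2 rows, which B's zip pairing truncates.
-- outside the precondition, e.g. on add_binArray([['1']], []): A returns ['#'], B returns []
import Mathlib
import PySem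

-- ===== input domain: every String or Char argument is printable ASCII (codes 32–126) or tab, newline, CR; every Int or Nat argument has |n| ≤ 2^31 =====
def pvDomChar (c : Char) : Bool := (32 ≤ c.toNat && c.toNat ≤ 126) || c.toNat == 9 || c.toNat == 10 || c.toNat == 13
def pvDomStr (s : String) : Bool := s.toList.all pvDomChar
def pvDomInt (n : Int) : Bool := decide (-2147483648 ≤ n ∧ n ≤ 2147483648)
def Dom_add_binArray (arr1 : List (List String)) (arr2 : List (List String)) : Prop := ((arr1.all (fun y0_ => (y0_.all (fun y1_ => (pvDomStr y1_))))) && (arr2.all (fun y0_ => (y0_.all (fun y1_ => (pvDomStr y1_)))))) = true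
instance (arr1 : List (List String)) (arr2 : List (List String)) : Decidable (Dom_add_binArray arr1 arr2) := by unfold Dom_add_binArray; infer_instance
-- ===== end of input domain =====

-- B replaces A's per-cell OR branch (string grown cell by cell) with an overlay algorithm:
-- a blank row of spaces is marked with '#' in two independent passes, one per source grid (same cost).

-- ===== PORT A =====
-- literal port: outer loop over range(len(arr1)), inner loop over range(len(arr1[0])),
-- string accumulator tmp; indexing via pyGetD (in range under Pre_).
def add_binArray (arr1 : List (List String)) (arr2 : List (List String)) : List String :=
  (PySem.List.pyRange 0 (arr1.length : Int) 1).foldl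
    (fun result i =>
      result ++ [(PySem.List.pyRange 0 ((PySem.List.pyGetD arr1 0 []).length : Int) 1).foldl
        (fun tmp j =>
          if PySem.List.pyGetD (PySem.List.pyGetD arr1 i []) j "" = "1" ∨
             PySem.List.pyGetD (PySem.List.pyGetD arr2 i []) j "" = "1"
          then tmp ++ "#" else tmp ++ " ") ""]) []

-- ===== PORT B =====
-- literal port of Source B: width = len(arr1[0]) if arr1 else 0; for each zipped row pair,
-- cells = [' '] * width, then for each of the two rows overlay '#' at the indices of '1'
-- cells (enumerate over row[:width], cells[j] = '#'), finally ''.join(cells).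
def add_binArray_alt (arr1 : List (List String)) (arr2 : List (List String)) : List String :=
  let width := match arr1 with | [] => 0 | r :: _ => r.length
  (arr1.zip arr2).foldl
    (fun result p =>
      let cells := [p.1, p.2].foldl
        (fun cells row =>
          (PySem.List.enumerate (row.take width)).foldl
            (fun cells q => if q.2 = "1" then PySem.List.pySetD cells q.1 "#" else cells)
            cells)
        (List.replicate width " ")
      result ++ [String.join cells])
    []

-- ===== PRECONDITION & SPEC =====
-- Pre_ excludes exactly the ragged inputs on which Python A raises IndexError (an arr1 row
-- shorter than len(arr1[0]), or a non-'1' cell whose arr2 counterpart is missing) and the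
-- corner where A returns only because every cell of a trailing arr1 row is '1', so the
-- short-circuit never touches the missing arr2 rows; B's zip pairing truncates there.
def Pre_add_binArray (arr1 : List (List String)) (arr2 : List (List String)) : Prop :=
  arr1.length ≤ arr2.length ∧
  (∀ r ∈ arr1, (arr1.headD []).length ≤ r.length) ∧
  (∀ i < arr1.length, ∀ j < (arr1.headD []).length,
    (arr1.getD i []).getD j "" = "1" ∨ j < (arr2.getD i []).length)
instance (arr1 : List (List String)) (arr2 : List (List String)) : Decidable (Pre_add_binArray arr1 arr2) := by unfold Pre_add_binArray; infer_instance

def pvWitness_add_binArray : List (List String) × List (List String) :=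
  ([["1", "0"], ["0", "x"]], [["0", "0"], ["1", "1"]])

def Spec_add_binArray (arr1 : List (List String)) (arr2 : List (List String)) (out : List String) : Prop := out = add_binArray_alt arr1 arr2
instance (arr1 : List (List String)) (arr2 : List (List String)) (out : List String) : Decidable (Spec_add_binArray arr1 arr2 out) := by unfold Spec_add_binArray; infer_instance

-- ===== CLAIM (what is proved, stated in full; the proofs are below) =====
def Claim_equal_add_binArray : Prop := ∀ (arr1 : List (List String)) (arr2 : List (List String)), Dom_add_binArray arr1 arr2 → Pre_add_binArray arr1 arr2 → Spec_add_binArray arr1 arr2 (add_binArray arr1 arr2)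

-- ===== LEMMAS AND PROOFS =====

-- the inner string-accumulating fold is the join of the mapped pieces
lemma foldl_strcat (l : List String) (a b : String) :
    l.foldl (· ++ ·) (a ++ b) = a ++ l.foldl (· ++ ·) b := by
  induction l generalizing b with
  | nil => simp
  | cons x t ih => simpa [String.append_assoc] using ih (b ++ x)

lemma foldl_str_append {α : Type} (f : α → String) (l : List α) (s0 : String) :
    l.foldl (fun s j => s ++ f j) s0 = s0 ++ String.join (l.map f) := by
  induction l generalizing s0 with
  | nil => simp [String.join]
  | cons a t ih =>
      simp only [List.foldl_cons, List.map_cons, String.join]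
      rw [ih]
      have : (f a) ++ List.foldl (· ++ ·) "" (t.map f)
           = List.foldl (· ++ ·) (f a) (t.map f) := by
        simpa using (foldl_strcat (t.map f) (f a) "").symm
      rw [String.append_assoc, String.join, this]; simp

-- A, rewritten index-free: a map over row indices of a joined map over column indices
lemma portA_eq_map (arr1 arr2 : List (List String)) :
    add_binArray arr1 arr2 =
      (List.range arr1.length).map (fun k =>
        String.join ((List.range (arr1.headD []).length).map (fun j =>
          if (arr1.getD k []).getD j "" = "1" ∨ (arr2.getD k []).getD j "" = "1"
          then "#" else " "))) := by
  unfold add_binArray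
  have h0 : PySem.List.pyGetD arr1 0 [] = arr1.headD [] := by
    rw [PySem.List.pyGetD_zero]; cases arr1 <;> simp
  rw [PySem.List.foldl_append_singleton_eq_map, h0]
  simp only [PySem.List.pyRange_zero_nat, List.map_map, List.nil_append]
  refine List.map_congr_left ?_
  intro k _
  have hfun : (fun (tmp : String) (j : Int) =>
      if PySem.List.pyGetD (PySem.List.pyGetD arr1 ((k : Nat) : Int) []) j "" = "1" ∨
         PySem.List.pyGetD (PySem.List.pyGetD arr2 ((k : Nat) : Int) []) j "" = "1"
      then tmp ++ "#" else tmp ++ " ")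
      = (fun (tmp : String) (j : Int) => tmp ++
        (if PySem.List.pyGetD (PySem.List.pyGetD arr1 ((k : Nat) : Int) []) j "" = "1" ∨
            PySem.List.pyGetD (PySem.List.pyGetD arr2 ((k : Nat) : Int) []) j "" = "1"
         then "#" else " ")) := by
    funext tmp j; split <;> rfl
  simp only [Function.comp_def]
  rw [hfun]
  show List.foldl _ "" _ = _
  rw [List.foldl_map, foldl_str_append]
  have : (fun (j : Nat) =>
      if PySem.List.pyGetD (PySem.List.pyGetD arr1 ((k : Nat) : Int) []) ((j : Nat) : Int) "" = "1" ∨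
         PySem.List.pyGetD (PySem.List.pyGetD arr2 ((k : Nat) : Int) []) ((j : Nat) : Int) "" = "1"
      then "#" else " ")
      = (fun (j : Nat) =>
        if (arr1.getD k []).getD j "" = "1" ∨ (arr2.getD k []).getD j "" = "1"
        then "#" else " ") := by
    funext j
    simp [PySem.List.pyGetD_natCast]
  rw [this]
  simp

-- B's inner overlay, rewritten as a fold over nat indices
lemma overlay_bridge (row cells : List String) :
    (PySem.List.enumerate row).foldl
      (fun c q => if q.2 = "1" then PySem.List.pySetD c q.1 "#" else c) cells
    = (List.range row.length).foldl
        (fun c j => if row.getD j "" = "1" then c.set j "#" else c) cells := by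
  rw [PySem.List.enumerate_eq_map_pyRange row ""]
  rw [List.foldl_map]
  have : PySem.List.pyRange 0 (PySem.List.len row) = List.map (fun k : Nat => (k : Int)) (List.range row.length) := by
    simp [PySem.List.len_eq, PySem.List.pyRange_zero_nat]
  rw [this, List.foldl_map]
  congr 1
  funext c j
  simp [PySem.List.pyGetD_natCast, PySem.List.pySetD_natCast]

lemma ovl_length (row : List String) (n : Nat) (cells : List String) :
    ((List.range n).foldl
      (fun c j => if row.getD j "" = "1" then c.set j "#" else c) cells).length
    = cells.length := by
  induction n generalizing cells with
  | zero => rfl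
  | succ n ih =>
      rw [List.range_succ, List.foldl_append, List.foldl_cons, List.foldl_nil]
      split
      · rw [List.length_set, ih]
      · rw [ih]

lemma ovl_getD (row : List String) (n : Nat) (cells : List String) (hn : n ≤ cells.length) (j : Nat) :
    ((List.range n).foldl
      (fun c i => if row.getD i "" = "1" then c.set i "#" else c) cells).getD j ""
    = if j < n ∧ row.getD j "" = "1" then "#" else cells.getD j "" := by
  induction n with
  | zero => simp
  | succ n ih =>
      rw [List.range_succ, List.foldl_append, List.foldl_cons, List.foldl_nil]
      have hF : ((List.range n).foldl
          (fun c i => if row.getD i "" = "1" then c.set i "#" else c) cells).length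
          = cells.length := ovl_length row n cells
      split
      · rename_i h
        by_cases hj : j = n
        · subst hj
          have hlt : j < cells.length := by omega
          rw [List.getD_eq_getElem _ _ (by rw [List.length_set, hF]; exact hlt),
            List.getElem_set, if_pos rfl, if_pos ⟨Nat.lt_succ_self j, h⟩]
        · have hne : (((List.range n).foldl
              (fun c i => if row.getD i "" = "1" then c.set i "#" else c) cells).set n "#").getD j ""
              = ((List.range n).foldl
              (fun c i => if row.getD i "" = "1" then c.set i "#" else c) cells).getD j "" := by
            unfold List.getD
            rw [List.getElem?_set_ne (by omega)]
          rw [hne, ih (by omega)]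
          have heq : (j < n + 1 ∧ row.getD j "" = "1") ↔ (j < n ∧ row.getD j "" = "1") := by
            constructor <;> rintro ⟨h1, h2⟩ <;> exact ⟨by omega, h2⟩
          simp only [heq]
      · rename_i h
        rw [ih (by omega)]
        have heq : (j < n + 1 ∧ row.getD j "" = "1") ↔ (j < n ∧ row.getD j "" = "1") := by
          constructor
          · rintro ⟨h1, h2⟩
            refine ⟨?_, h2⟩
            rcases Nat.lt_succ_iff_lt_or_eq.mp h1 with h' | h'
            · exact h'
            · subst h'; exact absurd h2 h
          · rintro ⟨h1, h2⟩; exact ⟨by omega, h2⟩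
        simp only [heq]

lemma cells_eq_map (r1 r2 : List String) (w : Nat) :
    [r1, r2].foldl
      (fun cells row =>
        (PySem.List.enumerate (row.take w)).foldl
          (fun cells q => if q.2 = "1" then PySem.List.pySetD cells q.1 "#" else cells)
          cells)
      (List.replicate w " ")
    = (List.range w).map (fun j =>
        if r1.getD j "" = "1" ∨ r2.getD j "" = "1" then "#" else " ") := by
  simp only [List.foldl_cons, List.foldl_nil, overlay_bridge]
  have hL1 : ((List.range (r1.take w).length).foldl
      (fun c j => if (r1.take w).getD j "" = "1" then c.set j "#" else c)
      (List.replicate w " ")).length = w := by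
    rw [ovl_length, List.length_replicate]
  apply List.ext_getElem
  · rw [ovl_length, hL1]; simp
  · intro j h1 h2
    have hjw : j < w := by simpa using h2
    rw [← List.getD_eq_getElem _ "" h1, List.getElem_map, List.getElem_range]
    rw [ovl_getD _ _ _ (by rw [hL1]; simp [List.length_take]),
      ovl_getD _ _ _ (by rw [List.length_replicate]; simp [List.length_take])]
    have htake : ∀ (r : List String),
        (j < (r.take w).length ∧ (r.take w).getD j "" = "1") ↔ (r.getD j "" = "1") := by
      intro r
      constructor
      · rintro ⟨ha, hb⟩
        have hjr : j < r.length := by simp [List.length_take] at ha; omega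
        rw [List.getD_eq_getElem _ _ ha, List.getElem_take] at hb
        rwa [List.getD_eq_getElem _ _ hjr]
      · intro hb
        have hjr : j < r.length := by
          by_contra hh
          rw [List.getD_eq_default _ _ (by omega)] at hb
          exact absurd hb (by decide)
        have ha : j < (r.take w).length := by simp [List.length_take]; omega
        refine ⟨ha, ?_⟩
        rw [List.getD_eq_getElem _ _ ha, List.getElem_take]
        rwa [List.getD_eq_getElem _ _ hjr] at hb
    simp only [htake]
    rw [List.getD_replicate " " hjw]
    by_cases hv2 : r2.getD j "" = "1"
    · rw [if_pos hv2, if_pos (Or.inr hv2)]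
    · rw [if_neg hv2]
      by_cases hv1 : r1.getD j "" = "1"
      · rw [if_pos hv1, if_pos (Or.inl hv1)]
      · rw [if_neg hv1, if_neg (by tauto)]

-- B, rewritten index-free: a map over zipped row pairs of the joined per-column OR
lemma portB_eq_map (arr1 arr2 : List (List String)) :
    add_binArray_alt arr1 arr2 = (arr1.zip arr2).map (fun p =>
      String.join ((List.range (arr1.headD []).length).map (fun j =>
        if p.1.getD j "" = "1" ∨ p.2.getD j "" = "1" then "#" else " "))) := by
  unfold add_binArray_alt
  cases arr1 with
  | nil => simp
  | cons r0 t =>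
    simp only [List.headD_cons]
    show ((r0 :: t).zip arr2).foldl (fun result p => result ++
        [String.join ([p.1, p.2].foldl
          (fun cells row =>
            (PySem.List.enumerate (row.take r0.length)).foldl
              (fun cells q => if q.2 = "1" then PySem.List.pySetD cells q.1 "#" else cells)
              cells)
          (List.replicate r0.length " "))]) [] = _
    rw [PySem.List.foldl_append_singleton_eq_map]
    simp only [List.nil_append]
    refine List.map_congr_left ?_
    intro p _
    rw [cells_eq_map]

-- ===== VERDICT =====
theorem add_binArray_spec : Claim_equal_add_binArray := by
  intro arr1 arr2 _ hpre
  unfold Spec_add_binArray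
  obtain ⟨hlen, -, -⟩ := hpre
  rw [portA_eq_map, portB_eq_map]
  apply List.ext_getElem
  · simp
    omega
  · intro i h1 h2
    have hi1 : i < arr1.length := by simpa using h1
    have hi2 : i < arr2.length := lt_of_lt_of_le hi1 hlen
    simp only [List.getElem_map, List.getElem_range, List.getElem_zip]
    rw [List.getD_eq_getElem arr1 [] hi1, List.getD_eq_getElem arr2 [] hi2]
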